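-- pv_equiv track=rewrite | github.com/wimglenn/everybody-codes-wim | ec_wim/ec2024/q07.py | essence_score
-- ===== SOURCE A (Python) =====
-- def essence_score(track, path, memo={}):
--     key = track, path
--     if key in memo:
--         return memo[key]
--     p0 = p = 10
--     psum = 0
--     for i in range(len(track)):
--         p += track[i] or path[i % len(path)]
--         psum += p
--     result = psum, (p - p0)
--     memo[key] = result
--     return result
-- ===== SOURCE B (Python) =====
-- def essence_score(track, path, memo={}):
--     key = track, path
--     if key in memo:
--         return memo[key]
--     n = len(track)
--     incs = [t if t else path[i % len(path)] for i, t in enumerate(track)]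
--     psum = 10 * n
--     for j, inc in enumerate(reversed(incs)):
--         psum += (j + 1) * inc
--     result = psum, sum(incs)
--     memo[key] = result
--     return result
-- ===== Notes on version B (the rewrite author's own statement) =====
-- stated objective: alternative
-- what changed: Replaces the running-power simulation by two staged passes: first build the increment list, then sum it for the delta and accumulate psum back-to-front over the reversed list with weight j+1 (no running power variable), starting from the closed-form base 10*n.
import Mathlib
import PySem

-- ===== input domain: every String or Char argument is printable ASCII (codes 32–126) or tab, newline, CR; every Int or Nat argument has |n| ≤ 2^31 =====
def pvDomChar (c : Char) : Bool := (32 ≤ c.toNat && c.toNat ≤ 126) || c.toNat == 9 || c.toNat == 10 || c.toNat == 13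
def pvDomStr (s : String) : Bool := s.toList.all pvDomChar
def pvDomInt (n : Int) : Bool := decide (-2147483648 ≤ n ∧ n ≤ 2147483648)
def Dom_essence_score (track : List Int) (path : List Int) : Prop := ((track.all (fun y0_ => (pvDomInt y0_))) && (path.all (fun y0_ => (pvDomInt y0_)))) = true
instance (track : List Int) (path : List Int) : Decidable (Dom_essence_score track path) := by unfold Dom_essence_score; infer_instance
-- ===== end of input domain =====

-- B replaces the running-power simulation by staged passes: build the increment list,
-- sum it for the delta, and accumulate psum back-to-front with weight j+1 from base 10*n;
-- return-value equivalence only (the Python memo side effect is identical caching in both).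

-- ===== PORT A =====
def essence_score (track : List Int) (path : List Int) : Int × Int :=
  let p0 : Int := 10
  let st := (List.range track.length).foldl (fun (st : Int × Int) (i : Nat) =>
    let t := PySem.List.pyGetD track (i : Int) 0
    let inc := if t ≠ 0 then t else PySem.List.pyGetD path (PySem.Int.mod (i : Int) (path.length : Int)) 0
    (st.1 + inc, st.2 + st.1 + inc)) (p0, 0)
  (st.2, st.1 - p0)

-- ===== PORT B =====
def essence_score_alt (track : List Int) (path : List Int) : Int × Int :=
  let n : Int := track.length
  let incs := track.zipIdx.map (fun ti =>
    if ti.1 ≠ 0 then ti.1 else PySem.List.pyGetD path (PySem.Int.mod ((ti.2 : Nat) : Int) (path.length : Int)) 0)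
  let psum := (incs.reverse.zipIdx).foldl (fun (s : Int) (ji : Int × Nat) => s + ((ji.2 : Int) + 1) * ji.1) (10 * n)
  (psum, incs.sum)

-- ===== PRECONDITION & SPEC =====
-- Pre_ excludes only the inputs on which Python A raises ZeroDivisionError:
-- an empty path together with a 0 element in track ('i % len(path)' with len(path) = 0).
def Pre_essence_score (track : List Int) (path : List Int) : Prop :=
  path ≠ [] ∨ (0 : Int) ∉ track
instance (track : List Int) (path : List Int) : Decidable (Pre_essence_score track path) := by
  unfold Pre_essence_score; infer_instance
def pvWitness_essence_score : List Int × List Int := ([1, 2, 0], [3])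
def Spec_essence_score (track : List Int) (path : List Int) (out : Int × Int) : Prop := out = essence_score_alt track path
instance (track : List Int) (path : List Int) (out : Int × Int) : Decidable (Spec_essence_score track path out) := by unfold Spec_essence_score; infer_instance

-- ===== CLAIM (what is proved, stated in full; the proofs are below) =====
def Claim_equal_essence_score : Prop := ∀ (track : List Int) (path : List Int), Dom_essence_score track path → Pre_essence_score track path → Spec_essence_score track path (essence_score track path)

-- ===== LEMMAS AND PROOFS =====

-- front-weighted sum: each element times the length of the suffix it starts
def pvWsum : List Int → Int
  | [] => 0
  | x :: xs => x * ((xs.length : Int) + 1) + pvWsum xs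

-- indexed-weight sum starting at offset k (element at offset j weighs j+1)
def pvW : List Int → Nat → Int
  | [], _ => 0
  | x :: xs, k => ((k : Int) + 1) * x + pvW xs (k + 1)

theorem pvW_foldl : ∀ (l : List Int) (k : Nat) (s : Int),
    (l.zipIdx k).foldl (fun (s : Int) (ji : Int × Nat) => s + ((ji.2 : Int) + 1) * ji.1) s
      = s + pvW l k := by
  intro l
  induction l with
  | nil => intro k s; simp [pvW]
  | cons x xs ih =>
    intro k s
    rw [List.zipIdx_cons]
    simp only [List.foldl_cons]
    rw [ih, pvW]
    ring

theorem pvW_append : ∀ (a b : List Int) (k : Nat),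
    pvW (a ++ b) k = pvW a k + pvW b (k + a.length) := by
  intro a
  induction a with
  | nil => intro b k; simp [pvW]
  | cons x xs ih =>
    intro b k
    simp only [List.cons_append, pvW, List.length_cons, ih]
    ring_nf

theorem pvW_reverse : ∀ (l : List Int), pvW l.reverse 0 = pvWsum l := by
  intro l
  induction l with
  | nil => rfl
  | cons x xs ih =>
    simp only [List.reverse_cons, pvW_append, pvWsum, pvW, ih,
      List.length_reverse]
    push_cast
    ring

-- A's running-power fold, over the increment list, in closed form
theorem pvA_fold : ∀ (incs : List Int) (p psum : Int),
    incs.foldl (fun (st : Int × Int) (inc : Int) => (st.1 + inc, st.2 + st.1 + inc)) (p, psum)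
      = (p + incs.sum, psum + p * incs.length + pvWsum incs) := by
  intro incs
  induction incs with
  | nil => intro p psum; simp [pvWsum]
  | cons x xs ih =>
    intro p psum
    simp only [List.foldl_cons, ih, List.sum_cons, List.length_cons, pvWsum]
    rw [Prod.mk.injEq]
    constructor
    · ring
    · push_cast; ring

-- A's fold over index range = the same fold over zipIdx pairs
theorem foldl_range'_eq_zipIdx {β : Type} (g : β → Nat → Int → β) :
    ∀ (xs pre : List Int) (init : β),
    (List.range' pre.length xs.length).foldl (fun st i => g st i ((pre ++ xs).getD i 0)) init
      = (xs.zipIdx pre.length).foldl (fun st p => g st p.2 p.1) init := by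
  intro xs
  induction xs with
  | nil => intro pre init; simp
  | cons x xs ih =>
    intro pre init
    simp only [List.length_cons]
    rw [List.range'_succ, List.zipIdx_cons]
    simp only [List.foldl_cons]
    have hx : (pre ++ x :: xs).getD pre.length 0 = x := by
      simp [List.getD]
    rw [hx]
    have := ih (pre ++ [x]) (g init pre.length x)
    simpa [List.append_assoc] using this

-- ===== VERDICT (by name: the statement is the Claim_ definition above) =====
theorem essence_score_spec : Claim_equal_essence_score := by
  intro track path _ _
  unfold Spec_essence_score essence_score essence_score_alt
  -- name the per-step increment
  set inc : Nat → Int → Int := fun i t =>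
    if t ≠ 0 then t else PySem.List.pyGetD path (PySem.Int.mod (i : Int) (path.length : Int)) 0 with hinc
  -- A: range fold → zipIdx fold → fold over the increment list
  have hA := foldl_range'_eq_zipIdx
      (fun (st : Int × Int) (i : Nat) (t : Int) => (st.1 + inc i t, st.2 + st.1 + inc i t))
      track [] ((10 : Int), (0 : Int))
  simp only [List.length_nil, List.nil_append] at hA
  have hmap : (track.zipIdx 0).foldl
      (fun (st : Int × Int) (p : Int × Nat) => (st.1 + inc p.2 p.1, st.2 + st.1 + inc p.2 p.1))
      ((10 : Int), (0 : Int))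
      = ((track.zipIdx 0).map (fun p => inc p.2 p.1)).foldl
          (fun (st : Int × Int) (v : Int) => (st.1 + v, st.2 + st.1 + v)) ((10 : Int), (0 : Int)) := by
    rw [List.foldl_map]
  -- B: identify its increment list with the same list
  set incs : List Int := (track.zipIdx 0).map (fun p => inc p.2 p.1) with hincs
  have hlen : incs.length = track.length := by
    simp [hincs]
  have hB := pvW_foldl incs.reverse 0 (10 * (track.length : Int))
  simp only [List.range_eq_range', PySem.List.pyGetD_natCast]
  -- align A's fold shape with the named inc
  have hA' : (List.range' 0 track.length).foldl
      (fun (st : Int × Int) (i : Nat) =>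
        (st.1 + inc i (track.getD i 0), st.2 + st.1 + inc i (track.getD i 0))) ((10 : Int), (0 : Int))
      = (incs.foldl (fun (st : Int × Int) (v : Int) => (st.1 + v, st.2 + st.1 + v)) ((10 : Int), (0 : Int))) := by
    rw [← hmap, ← hA]
  rw [show (fun (st : Int × Int) (i : Nat) =>
        let t := track.getD i 0
        let v := if t ≠ 0 then t else PySem.List.pyGetD path (PySem.Int.mod (i : Int) (path.length : Int)) 0
        (st.1 + v, st.2 + st.1 + v))
      = (fun (st : Int × Int) (i : Nat) =>
        (st.1 + inc i (track.getD i 0), st.2 + st.1 + inc i (track.getD i 0))) from by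
    funext st i; simp [hinc]]
  rw [hA', pvA_fold, hB, pvW_reverse]
  simp only [hlen]
  rw [Prod.mk.injEq]
  constructor <;> ring
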